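-- pv_equiv track=rewrite | github.com/juandavidjd/radar | cargar_combos_en_figuras.py | place_digits_in_block
-- ===== SOURCE A (Python) =====
-- def place_digits_in_block(block, combo_digits):
--     out=[r[:] for r in block]
--     coords=[]
--     for i in range(len(out)):
--         for j in range(len(out[0])):
--             if out[i][j] == "*":
--                 coords.append((i,j))
--     for k,d in enumerate(combo_digits[:4]):
--         if k < len(coords):
--             i,j = coords[k]
--             out[i][j] = d
--     return out
-- ===== SOURCE B (Python) =====
-- def place_digits_in_block(block, combo_digits):
--     remaining = combo_digits[:4]
--     w = len(block[0]) if block else 0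
--     out = []
--     for row in block:
--         new = row[:]
--         for j in range(w):
--             if new[j] == "*" and remaining:
--                 new[j] = remaining.pop(0)
--         out.append(new)
--     return out
-- ===== Notes on version B (the rewrite author's own statement) =====
-- stated objective: simpler
-- what changed: B drops A's intermediate coordinate list and second indexed pass: a single row-wise scan consumes a queue of at most four digits in place.
import Mathlib
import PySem

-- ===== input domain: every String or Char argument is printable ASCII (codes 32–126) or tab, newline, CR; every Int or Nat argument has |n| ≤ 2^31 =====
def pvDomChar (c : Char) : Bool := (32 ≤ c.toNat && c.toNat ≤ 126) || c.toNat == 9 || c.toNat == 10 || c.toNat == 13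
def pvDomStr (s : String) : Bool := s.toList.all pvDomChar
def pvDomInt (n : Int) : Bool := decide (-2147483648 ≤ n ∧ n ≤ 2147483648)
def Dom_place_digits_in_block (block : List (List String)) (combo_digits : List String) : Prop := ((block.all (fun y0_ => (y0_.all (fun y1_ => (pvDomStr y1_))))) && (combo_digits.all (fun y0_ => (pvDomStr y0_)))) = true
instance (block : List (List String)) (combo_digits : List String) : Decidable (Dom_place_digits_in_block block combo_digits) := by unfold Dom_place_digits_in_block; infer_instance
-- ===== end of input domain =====

-- B replaces A's intermediate coordinate list + second indexed pass by one row-wise scan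
-- consuming a queue of at most four digits (simpler decomposition; same asymptotic cost).

-- ===== PORT A =====
-- out[i][j] is read as (out.getD i []).getD j ""; exact for 0 ≤ i < len(out), 0 ≤ j < len(out[i])
-- (Python raises IndexError on a too-short row; Pre_ excludes exactly those inputs).
def pvCoords (out : List (List String)) (w : Nat) : List (Nat × Nat) :=
  (List.range out.length).foldl
    (fun acc i =>
      (List.range w).foldl
        (fun acc2 j => if (out.getD i []).getD j "" == "*" then acc2 ++ [(i, j)] else acc2)
        acc)
    []

-- out[i][j] = d for in-range i, j (A only writes at coordinates it has read, hence in range).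
def pvSetCell (o : List (List String)) (i j : Nat) (d : String) : List (List String) :=
  o.set i ((o.getD i []).set j d)

def place_digits_in_block (block : List (List String)) (combo_digits : List String) : List (List String) :=
  let out := block.map (fun r => r)          -- out = [r[:] for r in block]
  let coords := pvCoords out ((out.headD []).length)   -- len(out[0]): 0 only reached when out = []
  (PySem.List.enumerate (combo_digits.take 4) 0).foldl
    (fun o kd =>
      if kd.1 < (coords.length : Int) then
        let c := coords.getD kd.1.toNat (0, 0)   -- kd.1 ≥ 0 from enumerate, so toNat is exact
        pvSetCell o c.1 c.2 kd.2
      else o)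
    out

-- ===== PORT B =====
-- inner loop 'for j in range(w): if new[j]=="*" and remaining: new[j]=remaining.pop(0)'
def pvFillRow (row : List String) (w : Nat) (rem : List String) : List String × List String :=
  (List.range w).foldl
    (fun st j =>
      if st.1.getD j "" = "*" ∧ st.2 ≠ [] then (st.1.set j (st.2.headD ""), st.2.tail) else st)
    (row, rem)

def place_digits_in_block_alt (block : List (List String)) (combo_digits : List String) : List (List String) :=
  let w := (block.headD []).length           -- len(block[0]) if block else 0
  (block.foldl
    (fun (st : List (List String) × List String) row =>
      let p := pvFillRow row w st.2
      (st.1 ++ [p.1], p.2))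
    (([] : List (List String)), combo_digits.take 4)).1

-- ===== PRECONDITION & SPEC =====
-- Pre_ excludes ragged blocks containing a row strictly shorter than the first row:
-- there Python A raises IndexError (out[i][j] with j up to len(out[0])-1).
def Pre_place_digits_in_block (block : List (List String)) (combo_digits : List String) : Prop :=
  ∀ r ∈ block, (block.headD []).length ≤ r.length
instance (block : List (List String)) (combo_digits : List String) : Decidable (Pre_place_digits_in_block block combo_digits) := by unfold Pre_place_digits_in_block; infer_instance

def pvWitness_place_digits_in_block : List (List String) × List String :=
  ([["*", "a"], ["b", "*"]], ["1", "2"])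

def Spec_place_digits_in_block (block : List (List String)) (combo_digits : List String) (out : List (List String)) : Prop := out = place_digits_in_block_alt block combo_digits
instance (block : List (List String)) (combo_digits : List String) (out : List (List String)) : Decidable (Spec_place_digits_in_block block combo_digits out) := by unfold Spec_place_digits_in_block; infer_instance

-- ===== CLAIM (what is proved, stated in full; the proofs are below) =====
def Claim_equal_place_digits_in_block : Prop := ∀ (block : List (List String)) (combo_digits : List String), Dom_place_digits_in_block block combo_digits → Pre_place_digits_in_block block combo_digits → Spec_place_digits_in_block block combo_digits (place_digits_in_block block combo_digits)

-- ===== LEMMAS AND PROOFS =====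

-- star columns of a row among the first w columns
def pvStarCols (r : List String) (w : Nat) : List Nat :=
  (List.range w).filter (fun j => r.getD j "" == "*")

-- apply a list of (column, digit) writes to one row
def pvRowApply (r : List String) (jds : List (Nat × String)) : List String :=
  jds.foldl (fun rr jd => rr.set jd.1 jd.2) r

-- apply a list of ((i,j), digit) writes to the whole block
def pvApplyAll (ps : List ((Nat × Nat) × String)) (out : List (List String)) : List (List String) :=
  ps.foldl (fun o cd => pvSetCell o cd.1.1 cd.1.2 cd.2) out

-- row-wise reference computation (B's shape, by structural recursion)
def pvFillRows (rows : List (List String)) (w : Nat) (ds : List String) : List (List String) :=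
  match rows with
  | [] => []
  | r :: rs => (pvFillRow r w ds).1 :: pvFillRows rs w (pvFillRow r w ds).2

theorem pvB_foldl (rows : List (List String)) (w : Nat) :
    ∀ (acc : List (List String)) (ds : List String),
      (rows.foldl (fun (st : List (List String) × List String) row =>
          (st.1 ++ [(pvFillRow row w st.2).1], (pvFillRow row w st.2).2)) (acc, ds)).1
        = acc ++ pvFillRows rows w ds := by
  induction rows with
  | nil => intro acc ds; simp [pvFillRows]
  | cons r rs ih => intro acc ds; simp [pvFillRows, ih, List.append_assoc]

theorem pvAlt_eq (block : List (List String)) (cd : List String) :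
    place_digits_in_block_alt block cd
      = pvFillRows block ((block.headD []).length) (cd.take 4) := by
  simpa [place_digits_in_block_alt] using
    pvB_foldl block ((block.headD []).length) [] (cd.take 4)

-- coords characterisation
theorem pvCoords_flatMap (out : List (List String)) (w : Nat) :
    pvCoords out w
      = (List.range out.length).flatMap
          (fun i => (pvStarCols (out.getD i []) w).map (fun j => (i, j))) := by
  unfold pvCoords
  suffices h : ∀ (is : List Nat) (acc : List (Nat × Nat)),
      is.foldl (fun acc i => (List.range w).foldl
          (fun acc2 j => if (out.getD i []).getD j "" == "*" then acc2 ++ [(i, j)] else acc2) acc) acc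
        = acc ++ is.flatMap (fun i => (pvStarCols (out.getD i []) w).map (fun j => (i, j))) by
    simpa using h (List.range out.length) []
  intro is
  induction is with
  | nil => intro acc; simp
  | cons i is ih =>
      intro acc
      rw [List.foldl_cons, PySem.List.foldl_append_if, ih, List.flatMap_cons]
      simp [pvStarCols]

theorem pvCoords_nil (w : Nat) : pvCoords [] w = [] := by simp [pvCoords]

theorem pvCoords_cons (r : List String) (rs : List (List String)) (w : Nat) :
    pvCoords (r :: rs) w
      = (pvStarCols r w).map (fun j => ((0 : Nat), j))
        ++ (pvCoords rs w).map (fun p => (p.1 + 1, p.2)) := by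
  rw [pvCoords_flatMap, pvCoords_flatMap]
  rw [show (r :: rs).length = rs.length + 1 from rfl, List.range_succ_eq_map]
  simp [List.flatMap_cons, List.map_flatMap, List.flatMap_map, Function.comp_def]

-- A's enumerate-guard loop is the fold over coords.zip ds
theorem pvEnum_zip (coords : List (Nat × Nat)) :
    ∀ (ds : List String) (n : Nat) (out : List (List String)),
      (PySem.List.enumerate ds (n : Int)).foldl
        (fun o kd =>
          if kd.1 < (coords.length : Int) then
            pvSetCell o (coords.getD kd.1.toNat (0, 0)).1 (coords.getD kd.1.toNat (0, 0)).2 kd.2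
          else o) out
        = pvApplyAll ((coords.drop n).zip ds) out := by
  intro ds
  induction ds with
  | nil => intro n out; simp [PySem.List.enumerate_nil, pvApplyAll]
  | cons d ds ih =>
      intro n out
      rw [PySem.List.enumerate_cons, List.foldl_cons,
        show ((n : Int) + 1) = ((n + 1 : Nat) : Int) from by push_cast; ring]
      by_cases hn : n < coords.length
      · rw [if_pos (show ((n : Nat) : Int) < (coords.length : Int) from by exact_mod_cast hn)]
        rw [ih (n + 1)]
        rw [← List.getElem_cons_drop hn, List.zip_cons_cons]
        simp [pvApplyAll, Int.toNat_natCast, List.getD, List.getElem?_eq_getElem hn]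
      · rw [if_neg (show ¬ ((n : Nat) : Int) < (coords.length : Int) from by
          exact_mod_cast Nat.not_lt.mpr (Nat.not_lt.mp hn))]
        rw [ih (n + 1)]
        rw [List.drop_eq_nil_of_le (show coords.length ≤ n from Nat.not_lt.mp hn),
          List.drop_eq_nil_of_le (show coords.length ≤ n + 1 from by omega)]
        simp

theorem pvA_eq (block : List (List String)) (cd : List String) :
    place_digits_in_block block cd
      = pvApplyAll ((pvCoords block ((block.headD []).length)).zip (cd.take 4)) block := by
  have h := pvEnum_zip (pvCoords (block.map (fun r => r)) (((block.map (fun r => r)).headD []).length))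
      (cd.take 4) 0 (block.map (fun r => r))
  simpa [place_digits_in_block, List.map_id'] using h

-- zip distributes over append on the left, taking/dropping the digits
theorem pvZip_append {α β : Type} (l1 l2 : List α) :
    ∀ (ds : List β), (l1 ++ l2).zip ds = l1.zip ds ++ l2.zip (ds.drop l1.length) := by
  induction l1 with
  | nil => intro ds; simp
  | cons x xs ih =>
      intro ds
      cases ds with
      | nil => simp
      | cons d ds => simp [ih ds]

-- writes addressed to row 0 only touch the head row
theorem pvApply_row0 (jds : List (Nat × String)) :
    ∀ (r : List String) (rs : List (List String)),
      pvApplyAll (jds.map (fun jd => (((0 : Nat), jd.1), jd.2))) (r :: rs)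
        = pvRowApply r jds :: rs := by
  induction jds with
  | nil => intro r rs; simp [pvApplyAll, pvRowApply]
  | cons jd jds ih =>
      intro r rs
      simp only [List.map_cons, pvApplyAll, List.foldl_cons, pvRowApply]
      have h0 : pvSetCell (r :: rs) 0 jd.1 jd.2 = (r.set jd.1 jd.2) :: rs := by
        simp [pvSetCell]
      rw [h0]
      simpa [pvApplyAll, pvRowApply] using ih (r.set jd.1 jd.2) rs

-- writes addressed to rows i+1 leave the head row alone
theorem pvApply_shift (ps : List ((Nat × Nat) × String)) :
    ∀ (x : List String) (rs : List (List String)),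
      pvApplyAll (ps.map (fun cd => ((cd.1.1 + 1, cd.1.2), cd.2))) (x :: rs)
        = x :: pvApplyAll ps rs := by
  induction ps with
  | nil => intro x rs; simp [pvApplyAll]
  | cons p ps ih =>
      intro x rs
      simp only [List.map_cons, pvApplyAll, List.foldl_cons]
      have h1 : pvSetCell (x :: rs) (p.1.1 + 1) p.1.2 p.2 = x :: pvSetCell rs p.1.1 p.1.2 p.2 := by
        simp [pvSetCell]
      rw [h1]
      simpa [pvApplyAll] using ih x (pvSetCell rs p.1.1 p.1.2 p.2)

-- a batch of writes at columns < w does not change column w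
theorem pvRowApply_getD_high (jds : List (Nat × String)) :
    ∀ (r : List String) (w : Nat), (∀ jd ∈ jds, jd.1 < w) →
      (pvRowApply r jds).getD w "" = r.getD w "" := by
  induction jds with
  | nil => intro r w _; simp [pvRowApply]
  | cons jd jds ih =>
      intro r w h
      simp only [pvRowApply, List.foldl_cons]
      have hlt : jd.1 < w := h jd (by simp)
      have htail := ih (r.set jd.1 jd.2) w (fun x hx => h x (by simp [hx]))
      simp only [pvRowApply] at htail
      rw [htail]
      simp [List.getD, List.getElem?_set_ne (by omega : jd.1 ≠ w)]

theorem pvStarCols_lt (r : List String) (w : Nat) : ∀ j ∈ pvStarCols r w, j < w := by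
  intro j hj
  exact List.mem_range.mp (List.mem_filter.mp hj).1

-- B's inner loop computes the zip-writes on the row and drops the used digits
theorem pvFillRow_eq (r : List String) (w : Nat) :
    ∀ (ds : List String),
      pvFillRow r w ds
        = (pvRowApply r ((pvStarCols r w).zip ds), ds.drop (pvStarCols r w).length) := by
  induction w with
  | zero => intro ds; simp [pvFillRow, pvStarCols, pvRowApply]
  | succ w ih =>
      intro ds
      have hcols : pvStarCols r (w + 1)
          = pvStarCols r w ++ (if r.getD w "" = "*" then [w] else []) := by
        simp only [pvStarCols, List.range_succ, List.filter_append, List.filter_cons,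
          List.filter_nil]
        by_cases h : r.getD w "" = "*" <;> simp
      have hhigh : ∀ ds' : List String,
          (pvRowApply r ((pvStarCols r w).zip ds')).getD w "" = r.getD w "" := by
        intro ds'
        apply pvRowApply_getD_high
        intro jd hjd
        exact pvStarCols_lt r w jd.1 (List.of_mem_zip hjd).1
      rw [pvFillRow, List.range_succ, List.foldl_append, List.foldl_cons, List.foldl_nil]
      rw [show (List.range w).foldl _ (r, ds) = pvFillRow r w ds from rfl, ih ds]
      by_cases hstar : r.getD w "" = "*"
      · rw [hcols, if_pos hstar, pvZip_append, List.length_append]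
        by_cases hrem : ds.drop (pvStarCols r w).length = []
        · rw [if_neg (by simp [hrem])]
          rw [hrem]
          have h1 : ds.drop ((pvStarCols r w).length + [w].length) = [] := by
            rw [show (pvStarCols r w).length + [w].length = (pvStarCols r w).length + 1 from by
                  simp,
              ← List.tail_drop, hrem]
            rfl
          simp only [List.zip_nil_right, List.append_nil, Prod.mk.injEq, true_and]
          exact h1.symm
        · rw [if_pos ⟨by rw [hhigh]; exact hstar, hrem⟩]
          obtain ⟨d, ds', hds⟩ := List.exists_cons_of_ne_nil hrem
          rw [hds]
          have htail : ds.drop ((pvStarCols r w).length + [w].length) = ds' := by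
            rw [show (pvStarCols r w).length + [w].length = (pvStarCols r w).length + 1 from by
                  simp,
              ← List.tail_drop, hds]
            rfl
          rw [htail]
          simp [pvRowApply, List.foldl_append]
      · rw [if_neg (by
          intro hc
          exact hstar (by rw [← hhigh ds]; exact hc.1))]
        rw [hcols, if_neg hstar]
        simp

-- pvApplyAll distributes over append
theorem pvApplyAll_append (xs ys : List ((Nat × Nat) × String)) (o : List (List String)) :
    pvApplyAll (xs ++ ys) o = pvApplyAll ys (pvApplyAll xs o) := by
  simp [pvApplyAll, List.foldl_append]

-- the main bridge: A's write list applied to the block equals the row-wise fill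
theorem pvMain (w : Nat) :
    ∀ (rows : List (List String)) (ds : List String),
      pvApplyAll ((pvCoords rows w).zip ds) rows = pvFillRows rows w ds := by
  intro rows
  induction rows with
  | nil => intro ds; simp [pvCoords_nil, pvApplyAll, pvFillRows]
  | cons r rs ih =>
      intro ds
      rw [pvCoords_cons, pvZip_append, List.length_map, List.zip_map_left, List.zip_map_left,
        pvApplyAll_append]
      rw [show List.map (Prod.map (fun j => ((0 : Nat), j)) id) ((pvStarCols r w).zip ds)
            = ((pvStarCols r w).zip ds).map (fun jd => (((0 : Nat), jd.1), jd.2)) from rfl]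
      rw [show List.map (Prod.map (fun p : Nat × Nat => (p.1 + 1, p.2)) id)
              ((pvCoords rs w).zip (ds.drop (pvStarCols r w).length))
            = ((pvCoords rs w).zip (ds.drop (pvStarCols r w).length)).map
                (fun cd => ((cd.1.1 + 1, cd.1.2), cd.2)) from rfl]
      rw [pvApply_row0, pvApply_shift, ih]
      rw [pvFillRows, pvFillRow_eq]

-- ===== VERDICT (by name: the statement is the Claim_ definition above) =====
theorem place_digits_in_block_spec : Claim_equal_place_digits_in_block := by
  intro block cd _ _
  unfold Spec_place_digits_in_block
  rw [pvA_eq, pvAlt_eq]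
  exact pvMain ((block.headD []).length) block (cd.take 4)
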